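-- pv_equiv track=rewrite | github.com/Hwon-J/pract | 프로그래머스/3/42579. 베스트앨범/베스트앨범.py | solution
-- ===== SOURCE A (Python) =====
-- def solution(genres, plays):
--     answer = []
--     song_cnt = {}
--     song_list = {}
--     for i in range(len(genres)):
--         if genres[i] not in song_cnt:
--             song_cnt[genres[i]] = plays[i]
--         else:
--             song_cnt[genres[i]] += plays[i]
--         if genres[i] not in song_list:
--             song_list[genres[i]] = [[plays[i],i]]
--         else:
--             song_list[genres[i]].append([plays[i],i])
--
--     song_cnt = dict(sorted(song_cnt.items(), key = lambda x:x[1], reverse = True))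
--
--     for genre, _ in song_cnt.items():
--         song_list[genre] = sorted(song_list[genre], key=lambda x: (-x[0], x[1]))
--         if len(song_list[genre]) > 1:
--             answer.append(song_list[genre][0][1])
--             answer.append(song_list[genre][1][1])
--         else:
--             answer.append(song_list[genre][0][1])
--     return answer
-- ===== SOURCE B (Python) =====
-- def _upd(st, p, i):
--     # fold one song (plays p, index i) into a genre's (total, best, second) record
--     if st is None:
--         return (p, (p, i), None)
--     total, best, second = st
--     if best[0] < p:
--         return (total + p, (p, i), best)
--     if second is None or second[0] < p:
--         return (total + p, best, (p, i))
--     return (total + p, best, second)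
--
--
-- def solution(genres, plays):
--     # one pass: per genre keep (total plays, best song, second-best song);
--     # scanning in index order with strict '<' reproduces the (-plays, index) tie-break
--     stats = {}
--     for i, (g, p) in enumerate(zip(genres, plays)):
--         stats[g] = _upd(stats.get(g), p, i)
--     answer = []
--     for g, (total, best, second) in sorted(stats.items(), key=lambda kv: kv[1][0], reverse=True):
--         answer.append(best[1])
--         if second is not None:
--             answer.append(second[1])
--     return answer
-- ===== Notes on version B (the rewrite author's own statement) =====
-- stated objective: faster
-- what changed: B replaces A's two grouping dicts plus a full per-genre sort (and the genre-dict rebuild) with a single pass that maintains per-genre (total, best, second) records, then only sorts the genres by total.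
import Mathlib
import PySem

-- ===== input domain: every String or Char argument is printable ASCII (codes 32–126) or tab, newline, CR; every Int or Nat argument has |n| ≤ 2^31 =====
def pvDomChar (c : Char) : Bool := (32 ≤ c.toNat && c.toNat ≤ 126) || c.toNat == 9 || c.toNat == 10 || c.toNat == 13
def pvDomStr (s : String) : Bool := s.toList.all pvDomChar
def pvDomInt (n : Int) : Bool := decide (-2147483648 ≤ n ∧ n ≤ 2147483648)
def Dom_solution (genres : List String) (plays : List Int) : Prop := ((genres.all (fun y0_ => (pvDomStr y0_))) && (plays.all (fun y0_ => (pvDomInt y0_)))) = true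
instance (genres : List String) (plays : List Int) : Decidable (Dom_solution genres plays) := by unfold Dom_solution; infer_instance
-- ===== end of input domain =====

-- B is a single pass keeping per-genre (total, best, second) records instead of A's
-- two grouping dicts plus a full per-genre sort; same return value on Pre_solution.

-- ===== PORT A =====
def solution (genres : List String) (plays : List Int) : List Int :=
  let st :=
    (PySem.List.pyRange 0 (PySem.List.len genres)).foldl
      (fun (st : PySem.Dict String Int × PySem.Dict String (List (Int × Int))) i =>
        -- genres[i] is always in range here; plays[i] is in range under Pre_solution,
        -- so the pyGetD defaults are never read on admitted inputs
        let g := PySem.List.pyGetD genres i ""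
        let p := PySem.List.pyGetD plays i 0
        let songCnt :=
          if !st.1.contains g then st.1.insert g p
          else st.1.insert g (st.1.getD g 0 + p)
        let songList :=
          if !st.2.contains g then st.2.insert g [(p, i)]
          else st.2.insert g (st.2.getD g [] ++ [(p, i)])
        (songCnt, songList))
      (PySem.Dict.empty, PySem.Dict.empty)
  let songCnt := PySem.Dict.ofList (PySem.List.sorted st.1.items (fun x => x.2) true)
  songCnt.items.foldl
    (fun answer gv =>
      let lst := PySem.List.sorted2 (st.2.getD gv.1 []) (fun x => -x.1) (fun x => x.2) false
      if 1 < lst.length then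
        answer ++ [(PySem.List.pyGetD lst 0 (0, 0)).2] ++ [(PySem.List.pyGetD lst 1 (0, 0)).2]
      else
        answer ++ [(PySem.List.pyGetD lst 0 (0, 0)).2])
    []

-- ===== PORT B =====
-- one song (plays p, index i) folded into a genre's optional (total, best, second) record
def updSong (st : Option (Int × (Int × Int) × Option (Int × Int))) (p i : Int) :
    Int × (Int × Int) × Option (Int × Int) :=
  match st with
  | none => (p, (p, i), none)
  | some (total, best, second) =>
    if best.1 < p then (total + p, (p, i), some best)
    else
      match second with
      | none => (total + p, best, some (p, i))
      | some c => if c.1 < p then (total + p, best, some (p, i)) else (total + p, best, some c)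

def solution_alt (genres : List String) (plays : List Int) : List Int :=
  let stats :=
    (PySem.List.enumerate (genres.zip plays)).foldl
      (fun (d : PySem.Dict String (Int × (Int × Int) × Option (Int × Int))) e =>
        d.insert e.2.1 (updSong (d.get? e.2.1) e.2.2 e.1))
      PySem.Dict.empty
  (PySem.List.sorted stats.items (fun kv => kv.2.1) true).foldl
    (fun answer kv =>
      let answer := answer ++ [kv.2.2.1.2]
      match kv.2.2.2 with
      | none => answer
      | some c => answer ++ [c.2])
    []

-- ===== PRECONDITION & SPEC =====
-- Pre_ excludes only the inputs with fewer plays than genres, on which A raises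
-- IndexError at plays[i]; it admits every input A returns on.
def Pre_solution (genres : List String) (plays : List Int) : Prop :=
  genres.length ≤ plays.length
instance (genres : List String) (plays : List Int) : Decidable (Pre_solution genres plays) := by
  unfold Pre_solution; infer_instance

def pvWitness_solution : List String × List Int := (["pop", "pop", "rock"], [10, 20, 5])

def Spec_solution (genres : List String) (plays : List Int) (out : List Int) : Prop :=
  out = solution_alt genres plays
instance (genres : List String) (plays : List Int) (out : List Int) :
    Decidable (Spec_solution genres plays out) := by unfold Spec_solution; infer_instance

-- ===== CLAIM (what is proved, stated in full; the proofs are below) =====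
def Claim_equal_solution : Prop := ∀ (genres : List String) (plays : List Int),
  Dom_solution genres plays → Pre_solution genres plays →
  Spec_solution genres plays (solution genres plays)

-- ===== LEMMAS AND PROOFS =====

-- the per-genre list of (plays, index) pairs, read off the enumerated zip
def grpOf (g : String) (E : List (Int × String × Int)) : List (Int × Int) :=
  (E.filter (fun e => e.2.1 == g)).map (fun e => (e.2.2, e.1))

def totOf (g : String) (E : List (Int × String × Int)) : Int :=
  ((grpOf g E).map (·.1)).sum

-- B's per-song update, lifted to the optional record
def stepO (o : Option (Int × (Int × Int) × Option (Int × Int))) (x : Int × Int) :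
    Option (Int × (Int × Int) × Option (Int × Int)) :=
  some (updSong o x.1 x.2)

-- the comparison sorted2 uses for key (-plays, index)
def ltB (a b : Int × Int) : Bool :=
  decide (-a.1 < -b.1) || (!decide (-b.1 < -a.1) && decide (a.2 < b.2))

-- invariant tying B's record to A's sorted song list
def relBS (o : Option (Int × (Int × Int) × Option (Int × Int))) (s : List (Int × Int)) : Prop :=
  match o with
  | none => s = []
  | some (t, b, sec) => s.head? = some b ∧ s[1]? = sec ∧ t = (s.map (·.1)).sum

-- the common normal form both ports are reduced to
def canonOf (genres : List String) (plays : List Int) : List Int :=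
  let E := PySem.List.enumerate (genres.zip plays)
  let K := PySem.Set.ofList (E.map (fun e => e.2.1))
  (PySem.List.sorted K (fun g => totOf g E) true).foldl
    (fun ans g =>
      let s := PySem.List.sorted2 (grpOf g E) (fun x => -x.1) (fun x => x.2) false
      match s[1]? with
      | none => ans ++ [(s.headD (0, 0)).2]
      | some c => ans ++ [(s.headD (0, 0)).2, c.2])
    []

lemma foldl_range_enum {β : Type} (genres : List String) (plays : List Int)
    (h : genres.length ≤ plays.length) (f : β → String → Int → Int → β) (init : β) :
    (PySem.List.pyRange 0 (PySem.List.len genres)).foldl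
        (fun st i => f st (PySem.List.pyGetD genres i "") (PySem.List.pyGetD plays i 0) i) init
      = (PySem.List.enumerate (genres.zip plays)).foldl (fun st e => f st e.2.1 e.2.2 e.1) init := by
  rw [PySem.List.enumerate_eq_map_pyRange (genres.zip plays) ("", 0), List.foldl_map]
  have hlen : (genres.zip plays).length = genres.length := by
    simp [List.length_zip]; omega
  have hlen' : PySem.List.len (genres.zip plays) = PySem.List.len genres := by
    simp [PySem.List.len, hlen]
  rw [hlen']
  apply PySem.List.foldl_congr_mem
  intro acc x hx
  rw [PySem.List.mem_pyRange_one] at hx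
  have h0 : 0 ≤ x := hx.1
  have hxg : x < (genres.length : Int) := by simpa [PySem.List.len] using hx.2
  have h1 : x < ((genres.zip plays).length : Int) := by rw [hlen]; exact hxg
  have h2 : x < (plays.length : Int) := by
    have : (genres.length : Int) ≤ (plays.length : Int) := by exact_mod_cast h
    omega
  rw [PySem.List.pyGetD_eq_getElem _ _ h0 h1, PySem.List.pyGetD_eq_getElem _ _ h0 hxg,
    PySem.List.pyGetD_eq_getElem _ _ h0 h2, List.getElem_zip]

lemma getD_cnt (M : List (String × Int)) : ∀ (d : PySem.Dict String Int) (g : String),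
    (M.foldl (fun d x => d.insert x.1 (d.getD x.1 0 + x.2)) d).getD g 0
      = d.getD g 0 + ((M.filter (fun x => x.1 == g)).map (·.2)).sum := by
  induction M with
  | nil => intro d g; simp
  | cons x M ih =>
    intro d g
    simp only [List.foldl_cons, ih, List.filter_cons]
    by_cases hg : x.1 = g
    · simp [hg]
      ring
    · have : (x.1 == g) = false := by simp [hg]
      simp [this, PySem.Dict.getD_insert, Ne.symm hg]

lemma getD_lst (M : List (String × (Int × Int))) (d : PySem.Dict String (List (Int × Int)))
    (g : String) :
    (M.foldl (fun d x => d.insert x.1 (d.getD x.1 [] ++ [x.2])) d).getD g []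
      = d.getD g [] ++ (M.filter (fun x => x.1 == g)).map (·.2) := by
  have h := PySem.Dict.getD_foldl_modify_append (l := M) (d := d) (c := g)
  simp only [PySem.Dict.modify] at h
  exact h

lemma get?_sel (M : List (String × (Int × Int))) : ∀
    (d : PySem.Dict String (Int × (Int × Int) × Option (Int × Int))) (g : String),
    (M.foldl (fun d x => d.insert x.1 (updSong (d.get? x.1) x.2.1 x.2.2)) d).get? g
      = ((M.filter (fun x => x.1 == g)).map (·.2)).foldl stepO (d.get? g) := by
  induction M with
  | nil => intro d g; simp
  | cons x M ih =>
    intro d g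
    simp only [List.foldl_cons, ih, List.filter_cons]
    by_cases hg : x.1 = g
    · simp [hg, stepO]
    · have : (x.1 == g) = false := by simp [hg]
      simp [this, PySem.Dict.get?_insert, Ne.symm hg]

lemma stepO_none (x : Int × Int) : stepO none x = some (x.1, x, none) := by
  simp [stepO, updSong]

lemma stepO_lt (t : Int) (b : Int × Int) (sec : Option (Int × Int)) (x : Int × Int)
    (h : b.1 < x.1) : stepO (some (t, b, sec)) x = some (t + x.1, x, some b) := by
  simp [stepO, updSong, h]

lemma stepO_ge_none (t : Int) (b : Int × Int) (x : Int × Int)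
    (h : ¬ b.1 < x.1) : stepO (some (t, b, none)) x = some (t + x.1, b, some x) := by
  simp [stepO, updSong, h]

lemma stepO_ge_some_lt (t : Int) (b c x : Int × Int)
    (h : ¬ b.1 < x.1) (hc : c.1 < x.1) :
    stepO (some (t, b, some c)) x = some (t + x.1, b, some x) := by
  simp [stepO, updSong, h, hc]

lemma stepO_ge_some_ge (t : Int) (b c x : Int × Int)
    (h : ¬ b.1 < x.1) (hc : ¬ c.1 < x.1) :
    stepO (some (t, b, some c)) x = some (t + x.1, b, some c) := by
  simp [stepO, updSong, h, hc]

lemma ltB_of_idx_lt (x y : Int × Int) (h : y.2 < x.2) : ltB x y = decide (y.1 < x.1) := by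
  unfold ltB
  by_cases h1 : y.1 < x.1
  · simp [h1, show -x.1 < -y.1 by omega]
  · simp [h1, show ¬(-x.1 < -y.1) by omega, show ¬(x.2 < y.2) by omega]

lemma sum_map_insertBy (x : Int × Int) (s : List (Int × Int)) :
    ((PySem.List.insertBy ltB x s).map (·.1)).sum = x.1 + (s.map (·.1)).sum := by
  have hp := (PySem.List.insertBy_perm ltB x s).map (·.1)
  simpa using hp.sum_eq

lemma sel_step (x : Int × Int) (s : List (Int × Int))
    (o : Option (Int × (Int × Int) × Option (Int × Int)))
    (hrel : relBS o s) (hidx : ∀ y ∈ s, y.2 < x.2) :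
    relBS (stepO o x) (PySem.List.insertBy ltB x s) := by
  cases o with
  | none =>
    have hs : s = [] := hrel
    subst hs
    rw [stepO_none]
    simp [relBS, PySem.List.insertBy]
  | some st =>
    obtain ⟨t, b, sec⟩ := st
    obtain ⟨hh, h1, ht⟩ := hrel
    cases s with
    | nil => simp at hh
    | cons a t' =>
      have hab : a = b := by simpa using hh
      subst hab
      have hax : a.2 < x.2 := hidx a (by simp)
      have hlt : ltB x a = decide (a.1 < x.1) := ltB_of_idx_lt x a hax
      simp only [PySem.List.insertBy, hlt]
      by_cases hba : a.1 < x.1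
      · rw [stepO_lt t a sec x hba]
        simp only [hba, decide_true, if_true]
        refine ⟨by simp, by simp, ?_⟩
        simp only [List.map_cons, List.sum_cons] at ht ⊢
        omega
      · simp only [hba, decide_false, Bool.false_eq_true, if_false]
        have h1' : t'[0]? = sec := by simpa using h1
        cases sec with
        | none =>
          have ht' : t' = [] := by cases t' <;> simp_all
          subst ht'
          rw [stepO_ge_none t a x hba]
          refine ⟨by simp [PySem.List.insertBy], by simp [PySem.List.insertBy], ?_⟩
          simp only [List.map_cons, List.sum_cons, PySem.List.insertBy] at ht ⊢
          simp at ht ⊢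
          omega
        | some c =>
          obtain ⟨w, u, rfl⟩ : ∃ w u, t' = w :: u := by
            cases t' with
            | nil => simp at h1'
            | cons w u => exact ⟨w, u, rfl⟩
          have hwc : w = c := by simpa using h1'
          subst hwc
          have hcx : w.2 < x.2 := hidx w (by simp)
          have hltc : ltB x w = decide (w.1 < x.1) := ltB_of_idx_lt x w hcx
          simp only [PySem.List.insertBy, hltc]
          by_cases hcx1 : w.1 < x.1
          · rw [stepO_ge_some_lt t a w x hba hcx1]
            simp only [hcx1, decide_true, if_true]
            refine ⟨by simp, by simp, ?_⟩
            simp only [List.map_cons, List.sum_cons] at ht ⊢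
            omega
          · rw [stepO_ge_some_ge t a w x hba hcx1]
            simp only [hcx1, decide_false, Bool.false_eq_true, if_false]
            refine ⟨by simp, by simp, ?_⟩
            simp only [List.map_cons, List.sum_cons, sum_map_insertBy] at ht ⊢
            omega

lemma sel_inv (l : List (Int × Int)) (s : List (Int × Int))
    (o : Option (Int × (Int × Int) × Option (Int × Int)))
    (hrel : relBS o s) (hb : ∀ y ∈ s, ∀ z ∈ l, y.2 < z.2)
    (hp : l.Pairwise (fun a b => a.2 < b.2)) :
    relBS (l.foldl stepO o) (l.foldl (fun acc x => PySem.List.insertBy ltB x acc) s) := by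
  induction l generalizing s o with
  | nil => simpa using hrel
  | cons x l ih =>
    simp only [List.foldl_cons]
    apply ih
    · exact sel_step x s o hrel (fun y hy => hb y hy x (by simp))
    · intro y hy z hz
      rcases (PySem.List.mem_insertBy ltB x y s).mp hy with hyx | hys
      · subst hyx
        exact (List.pairwise_cons.mp hp).1 z hz
      · exact hb y hys z (by simp [hz])
    · exact (List.pairwise_cons.mp hp).2

lemma le_fst_of_mem_enumerate {α : Type} (xs : List α) : ∀ (s : Int) (e : Int × α),
    e ∈ PySem.List.enumerate xs s → s ≤ e.1 := by
  induction xs with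
  | nil => intro s e he; simp [PySem.List.enumerate_nil] at he
  | cons x xs ih =>
    intro s e he
    rw [PySem.List.enumerate_cons] at he
    rcases List.mem_cons.mp he with he | he
    · simp [he]
    · have := ih (s + 1) e he; omega

lemma pairwise_enumerate {α : Type} (xs : List α) : ∀ (s : Int),
    (PySem.List.enumerate xs s).Pairwise (fun a b => a.1 < b.1) := by
  induction xs with
  | nil => intro s; simp [PySem.List.enumerate_nil]
  | cons x xs ih =>
    intro s
    rw [PySem.List.enumerate_cons]
    refine List.Pairwise.cons ?_ (ih (s + 1))
    intro e he
    have := le_fst_of_mem_enumerate xs (s + 1) e he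
    simpa using by omega

lemma pairwise_grp (g : String) (gp : List (String × Int)) :
    (grpOf g (PySem.List.enumerate gp)).Pairwise (fun a b => a.2 < b.2) := by
  unfold grpOf
  exact List.Pairwise.map (R := fun a b => a.1 < b.1) _ (fun a b hab => hab)
    (List.Pairwise.sublist List.filter_sublist (pairwise_enumerate gp 0))

lemma insertBy_map {α β : Type} (f : α → β) (bf : β → β → Bool) (x : α) (l : List α) :
    PySem.List.insertBy bf (f x) (l.map f)
      = (PySem.List.insertBy (fun a b => bf (f a) (f b)) x l).map f := by
  induction l with
  | nil => simp [PySem.List.insertBy]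
  | cons y l ih =>
    simp only [List.map_cons, PySem.List.insertBy]
    by_cases h : bf (f x) (f y) = true
    · simp [h]
    · simp [h, ih]

lemma sorted_rev_map {α β κ : Type} [LT κ] [DecidableLT κ] (K : List α) (f : α → β) (key : β → κ) :
    PySem.List.sorted (K.map f) key true
      = (PySem.List.sorted K (fun g => key (f g)) true).map f := by
  rw [PySem.List.sorted_rev_eq_foldl_insertBy, PySem.List.sorted_rev_eq_foldl_insertBy,
    List.foldl_map]
  suffices h : ∀ (acc : List β) (acc' : List α), acc = acc'.map f →
      K.foldl (fun acc g => PySem.List.insertBy (fun a b => decide (key b < key a)) (f g) acc) acc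
        = (K.foldl (fun acc g => PySem.List.insertBy (fun a b => decide (key (f b) < key (f a))) g acc) acc').map f by
    exact h [] [] rfl
  induction K with
  | nil => intro acc acc' h; simpa using h
  | cons k K ih =>
    intro acc acc' h
    subst h
    simp only [List.foldl_cons]
    exact ih _ _ (insertBy_map f _ k acc')

lemma items_ofList_of_nodup {ν : Type} (l : List (String × ν)) (h : (l.map Prod.fst).Nodup) :
    (PySem.Dict.ofList l).items = l := by
  have := PySem.Dict.items_foldl_insert_fresh (l := l) (k := Prod.fst) (v := Prod.snd)
    (d := PySem.Dict.empty) (by intro a _; simp) h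
  simpa [PySem.Dict.ofList, PySem.Dict.update] using this

lemma sorted2_eq_foldl (l : List (Int × Int)) :
    PySem.List.sorted2 l (fun x => -x.1) (fun x => x.2) false
      = l.foldl (fun acc x => PySem.List.insertBy ltB x acc) [] := by
  rfl

lemma grp_ne_nil (g : String) (E : List (Int × String × Int))
    (hg : g ∈ PySem.Set.ofList (E.map (fun e => e.2.1))) : grpOf g E ≠ [] := by
  rw [PySem.Set.mem_ofList] at hg
  obtain ⟨e, he, heg⟩ := List.mem_map.mp hg
  have : (e.2.2, e.1) ∈ grpOf g E := by
    refine List.mem_map.mpr ⟨e, ?_, rfl⟩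
    exact List.mem_filter.mpr ⟨he, by simp [heg]⟩
  exact List.ne_nil_of_mem this

lemma solution_eq_canon (genres : List String) (plays : List Int)
    (h : genres.length ≤ plays.length) :
    solution genres plays = canonOf genres plays := by
  unfold solution canonOf
  simp only []
  rw [PySem.List.foldl_prod_mk
    (f := fun (d : PySem.Dict String Int) (i : Int) =>
      if !(d.contains (PySem.List.pyGetD genres i "")) then
        d.insert (PySem.List.pyGetD genres i "") (PySem.List.pyGetD plays i 0)
      else
        d.insert (PySem.List.pyGetD genres i "")
          (d.getD (PySem.List.pyGetD genres i "") 0 + PySem.List.pyGetD plays i 0))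
    (g := fun (d : PySem.Dict String (List (Int × Int))) (i : Int) =>
      if !(d.contains (PySem.List.pyGetD genres i "")) then
        d.insert (PySem.List.pyGetD genres i "") [(PySem.List.pyGetD plays i 0, i)]
      else
        d.insert (PySem.List.pyGetD genres i "")
          (d.getD (PySem.List.pyGetD genres i "") [] ++ [(PySem.List.pyGetD plays i 0, i)]))]
  simp only []
  set E := PySem.List.enumerate (genres.zip plays) with hE
  set K := PySem.Set.ofList (E.map (fun e => e.2.1)) with hK
  -- count dict: drop the branch, bridge to a fold over E, then over (genre, plays)
  have hCif : (PySem.List.pyRange 0 (PySem.List.len genres)).foldl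
      (fun (d : PySem.Dict String Int) i =>
        if !(d.contains (PySem.List.pyGetD genres i "")) then
          d.insert (PySem.List.pyGetD genres i "") (PySem.List.pyGetD plays i 0)
        else
          d.insert (PySem.List.pyGetD genres i "")
            (d.getD (PySem.List.pyGetD genres i "") 0 + PySem.List.pyGetD plays i 0))
      PySem.Dict.empty
      = (PySem.List.pyRange 0 (PySem.List.len genres)).foldl
        (fun (d : PySem.Dict String Int) i =>
          d.insert (PySem.List.pyGetD genres i "")
            (d.getD (PySem.List.pyGetD genres i "") 0 + PySem.List.pyGetD plays i 0))
        PySem.Dict.empty := by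
    apply PySem.List.foldl_congr_mem
    intro acc i _
    cases hc : acc.contains (PySem.List.pyGetD genres i "") with
    | false => simp [PySem.Dict.getD_of_not_contains acc _ hc]
    | true => simp
  have hCbr := foldl_range_enum genres plays h
    (fun (d : PySem.Dict String Int) g p _ => d.insert g (d.getD g 0 + p)) PySem.Dict.empty
  simp only [] at hCbr
  have hCmap : E.foldl
      (fun (d : PySem.Dict String Int) e => d.insert e.2.1 (d.getD e.2.1 0 + e.2.2))
      PySem.Dict.empty
      = (E.map (fun e => (e.2.1, e.2.2))).foldl
        (fun d x => d.insert x.1 (d.getD x.1 0 + x.2)) PySem.Dict.empty := by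
    rw [List.foldl_map]
  rw [hCif, hCbr, hCmap]
  set C := (E.map (fun e => (e.2.1, e.2.2))).foldl
      (fun d x => d.insert x.1 (d.getD x.1 0 + x.2)) PySem.Dict.empty with hC
  -- song-list dict likewise
  have hLif : (PySem.List.pyRange 0 (PySem.List.len genres)).foldl
      (fun (d : PySem.Dict String (List (Int × Int))) i =>
        if !(d.contains (PySem.List.pyGetD genres i "")) then
          d.insert (PySem.List.pyGetD genres i "") [(PySem.List.pyGetD plays i 0, i)]
        else
          d.insert (PySem.List.pyGetD genres i "")
            (d.getD (PySem.List.pyGetD genres i "") [] ++ [(PySem.List.pyGetD plays i 0, i)]))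
      PySem.Dict.empty
      = (PySem.List.pyRange 0 (PySem.List.len genres)).foldl
        (fun (d : PySem.Dict String (List (Int × Int))) i =>
          d.insert (PySem.List.pyGetD genres i "")
            (d.getD (PySem.List.pyGetD genres i "") [] ++ [(PySem.List.pyGetD plays i 0, i)]))
        PySem.Dict.empty := by
    apply PySem.List.foldl_congr_mem
    intro acc i _
    cases hc : acc.contains (PySem.List.pyGetD genres i "") with
    | false => simp [PySem.Dict.getD_of_not_contains acc _ hc]
    | true => simp
  have hLbr := foldl_range_enum genres plays h
    (fun (d : PySem.Dict String (List (Int × Int))) g p i => d.insert g (d.getD g [] ++ [(p, i)]))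
    PySem.Dict.empty
  simp only [] at hLbr
  have hLmap : E.foldl
      (fun (d : PySem.Dict String (List (Int × Int))) e =>
        d.insert e.2.1 (d.getD e.2.1 [] ++ [(e.2.2, e.1)])) PySem.Dict.empty
      = (E.map (fun e => (e.2.1, (e.2.2, e.1)))).foldl
        (fun d x => d.insert x.1 (d.getD x.1 [] ++ [x.2])) PySem.Dict.empty := by
    rw [List.foldl_map]
  rw [hLif, hLbr, hLmap]
  set Lam := (E.map (fun e => (e.2.1, (e.2.2, e.1)))).foldl
      (fun d x => d.insert x.1 (d.getD x.1 [] ++ [x.2])) PySem.Dict.empty with hLam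
  have hgetL : ∀ g, Lam.getD g [] = grpOf g E := by
    intro g
    rw [hLam, getD_lst]
    simp only [PySem.Dict.getD_empty, List.nil_append, List.filter_map, List.map_map]
    rfl
  have hgetC : ∀ g, C.getD g 0 = totOf g E := by
    intro g
    rw [hC, getD_cnt]
    simp only [PySem.Dict.getD_empty, zero_add, List.filter_map, List.map_map]
    unfold totOf grpOf
    rw [List.map_map]
    rfl
  have hkeysC : C.keys = K := by
    rw [hC]
    have := PySem.Dict.keys_foldl_insert_key (E.map (fun e => (e.2.1, e.2.2)))
      Prod.fst (fun d x => d.getD x.1 0 + x.2) PySem.Dict.empty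
    simpa [List.map_map, Function.comp, PySem.Dict.keys_empty] using this
  have hnodupC : C.keys.Nodup := by
    rw [hC]
    exact PySem.Dict.nodup_keys_foldl_insert_key _ Prod.fst _ _ PySem.Dict.nodup_keys_empty
  set fC : String → String × Int := fun g => (g, totOf g E) with hfC
  have hitemsC : C.items = K.map fC := by
    rw [PySem.Dict.items_eq_map_keys C hnodupC 0, hkeysC]
    apply List.map_congr_left
    intro g _
    rw [hfC]
    simp only []
    rw [hgetC g]
  rw [hitemsC]
  have hsm : PySem.List.sorted (K.map fC) (fun x => x.2) true
      = (PySem.List.sorted K (fun g => totOf g E) true).map fC := by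
    rw [sorted_rev_map K fC (fun x => x.2)]
  rw [hsm]
  set S := PySem.List.sorted K (fun g => totOf g E) true with hS
  have hSK : ∀ g ∈ S, g ∈ K := fun g hg => (PySem.List.sorted_perm K _ true).mem_iff.mp hg
  have hSnodup : (S.map fC).map Prod.fst = S := by
    rw [List.map_map]
    have hid : (Prod.fst ∘ fC) = fun g => g := by funext g; rfl
    rw [hid]
    simp
  have hitemsOf : (PySem.Dict.ofList (S.map fC)).items = S.map fC := by
    apply items_ofList_of_nodup
    rw [hSnodup]
    exact (PySem.List.sorted_perm K _ true).nodup_iff.mpr (PySem.Set.nodup_ofList _)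
  rw [hitemsOf, List.foldl_map]
  apply PySem.List.foldl_congr_mem
  intro acc g hg
  rw [hfC]
  simp only []
  rw [hgetL g]
  cases hsrtc : PySem.List.sorted2 (grpOf g E) (fun x => -x.1) (fun x => x.2) false with
  | nil =>
    exfalso
    have hperm := PySem.List.sorted2_perm (grpOf g E) (fun x => -x.1) (fun x => x.2) false
    rw [hsrtc] at hperm
    exact grp_ne_nil g E (hSK g hg) hperm.symm.eq_nil
  | cons a u =>
    cases u with
    | nil => simp
    | cons b v =>
      simp [PySem.List.pyGetD_ofNat']

lemma solution_alt_eq_canon (genres : List String) (plays : List Int) :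
    solution_alt genres plays = canonOf genres plays := by
  unfold solution_alt canonOf
  simp only []
  set E := PySem.List.enumerate (genres.zip plays) with hE
  set K := PySem.Set.ofList (E.map (fun e => e.2.1)) with hK
  -- the stats fold, seen as a fold over the (genre, (plays, index)) list
  have hfold : E.foldl
      (fun (d : PySem.Dict String (Int × (Int × Int) × Option (Int × Int))) e =>
        d.insert e.2.1 (updSong (d.get? e.2.1) e.2.2 e.1)) PySem.Dict.empty
      = (E.map (fun e => (e.2.1, (e.2.2, e.1)))).foldl
          (fun d x => d.insert x.1 (updSong (d.get? x.1) x.2.1 x.2.2)) PySem.Dict.empty := by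
    rw [List.foldl_map]
  rw [hfold]
  set stats := (E.map (fun e => (e.2.1, (e.2.2, e.1)))).foldl
      (fun d x => d.insert x.1 (updSong (d.get? x.1) x.2.1 x.2.2)) PySem.Dict.empty with hstats
  have hkeys : stats.keys = K := by
    rw [hstats]
    have := PySem.Dict.keys_foldl_insert_key (E.map (fun e => (e.2.1, (e.2.2, e.1))))
      Prod.fst (fun d x => updSong (d.get? x.1) x.2.1 x.2.2) PySem.Dict.empty
    simpa [List.map_map, Function.comp, PySem.Dict.keys_empty] using this
  have hnodup : stats.keys.Nodup := by
    rw [hstats]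
    exact PySem.Dict.nodup_keys_foldl_insert_key _ Prod.fst _ _ PySem.Dict.nodup_keys_empty
  have hget : ∀ g, stats.get? g = (grpOf g E).foldl stepO none := by
    intro g
    rw [hstats, get?_sel]
    simp only [PySem.Dict.get?_empty, List.filter_map, List.map_map]
    rfl
  set fB : String → String × (Int × (Int × Int) × Option (Int × Int)) := fun g =>
      (g, totOf g E,
        ((PySem.List.sorted2 (grpOf g E) (fun x => -x.1) (fun x => x.2) false).headD (0, 0),
         (PySem.List.sorted2 (grpOf g E) (fun x => -x.1) (fun x => x.2) false)[1]?)) with hfB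
  have hitems : stats.items = K.map fB := by
    rw [PySem.Dict.items_eq_map_keys stats hnodup (0, (0, 0), none), hkeys]
    apply List.map_congr_left
    intro g hg
    have hrel := sel_inv (grpOf g E) [] none rfl (by simp) (pairwise_grp g (genres.zip plays))
    rw [← sorted2_eq_foldl] at hrel
    set sel := (grpOf g E).foldl stepO none with hsel
    set srt := PySem.List.sorted2 (grpOf g E) (fun x => -x.1) (fun x => x.2) false with hsrt
    cases hselc : sel with
    | none =>
      exfalso
      rw [hselc] at hrel
      have hnil : srt = [] := hrel
      have hperm := PySem.List.sorted2_perm (grpOf g E) (fun x => -x.1) (fun x => x.2) false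
      rw [← hsrt, hnil] at hperm
      exact grp_ne_nil g E hg hperm.symm.eq_nil
    | some v =>
      obtain ⟨t, b, sec⟩ := v
      rw [hselc] at hrel
      obtain ⟨hh, h1, ht⟩ := hrel
      rw [hfB]
      simp only []
      rw [PySem.Dict.getD_eq_get?_getD, hget g, ← hsel, hselc]
      simp only [Option.getD_some]
      have hhd : srt.headD (0, 0) = b := by
        cases hsrtc : srt with
        | nil => rw [hsrtc] at hh; simp at hh
        | cons a u => rw [hsrtc] at hh; simp at hh; simp [hh]
      have htot : t = totOf g E := by
        rw [ht]
        unfold totOf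
        have := (PySem.List.sorted2_perm (grpOf g E) (fun x => -x.1) (fun x => x.2) false).map (·.1)
        rw [← hsrt] at this
        exact this.sum_eq
      rw [← hsrt, hhd, h1, htot]
  rw [hitems]
  rw [sorted_rev_map K fB (fun kv => kv.2.1)]
  rw [List.foldl_map]
  apply PySem.List.foldl_congr_mem
  intro acc g hg
  rw [hfB]
  simp only []
  cases h1 : (PySem.List.sorted2 (grpOf g E) (fun x => -x.1) (fun x => x.2) false)[1]? with
  | none => simp
  | some c => simp

-- ===== VERDICT (by name: the statement is the Claim_ definition above) =====
theorem solution_spec : Claim_equal_solution := by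
  intro genres plays _ hpre
  unfold Spec_solution
  rw [solution_eq_canon genres plays hpre, solution_alt_eq_canon genres plays]
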